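-- pv_equiv track=rewrite | github.com/kkm0406/Programmers | 2022 KAKAO BLIND RECRUITMENT/오픈채팅방.py | solution
-- ===== SOURCE A (Python) =====
-- def solution(records):
--     answer = []
--     users = {}
--     for record in records:
--         record = record.split(" ")
--         if record[0] == "Enter":
--             users[record[1]] = record[2]
--             answer.append( [record[1], "님이 들어왔습니다."])
--         elif record[0] == "Leave":
--             answer.append( [record[1], "님이 나갔습니다."])
--         elif record[0] == "Change":
--             users[record[1]] = record[2]
--
--     result = []
--     for record in answer:
--         uid, msg = record
--         result.append(f"{users[uid]}"+msg)
--
--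
--     return result
-- ===== SOURCE B (Python) =====
-- def solution(records):
--     # no dict, no intermediate event list: resolve each final nickname by a
--     # backward linear search through the raw records
--     def final_name(uid):
--         for rec in reversed(records):
--             p = rec.split(" ")
--             if (p[0] == "Enter" or p[0] == "Change") and p[1] == uid:
--                 return p[2]
--     out = []
--     for rec in records:
--         p = rec.split(" ")
--         if p[0] == "Enter":
--             out.append(final_name(p[1]) + "님이 들어왔습니다.")
--         elif p[0] == "Leave":
--             out.append(final_name(p[1]) + "님이 나갔습니다.")
--     return out
-- ===== Notes on version B (the rewrite author's own statement) =====
-- stated objective: alternative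
-- what changed: B removes both the uid->nickname dict and A's intermediate [uid,msg] event list: each Enter/Leave message resolves the final nickname on the spot by a backward linear search through the raw records (last Enter/Change for that uid).
import Mathlib
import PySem

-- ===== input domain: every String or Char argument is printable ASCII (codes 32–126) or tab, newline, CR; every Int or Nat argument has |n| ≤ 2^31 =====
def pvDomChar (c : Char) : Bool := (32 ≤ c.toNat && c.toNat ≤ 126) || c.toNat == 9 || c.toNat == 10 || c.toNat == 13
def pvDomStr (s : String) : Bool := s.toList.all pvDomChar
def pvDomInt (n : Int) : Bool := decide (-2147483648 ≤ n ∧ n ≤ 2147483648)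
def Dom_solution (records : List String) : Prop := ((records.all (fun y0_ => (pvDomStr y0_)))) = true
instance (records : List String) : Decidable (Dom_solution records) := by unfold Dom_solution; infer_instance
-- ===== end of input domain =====

-- B drops A's uid->nickname dict and A's intermediate [uid,msg] event list: each message's
-- final nickname is found by a backward linear search through the raw records (alternative algorithm, O(n^2) vs A's O(n)).

-- ===== PORT A =====
-- loop body of A's first for-loop, on state (answer, users)
def pvAStep (st : List (String × String) × PySem.Dict String String) (record : String) :
    List (String × String) × PySem.Dict String String :=
  let p := (PySem.Str.split? record " ").getD []
  if PySem.List.pyGetD p 0 "" = "Enter" then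
    (st.1 ++ [(PySem.List.pyGetD p 1 "", "님이 들어왔습니다.")],
     st.2.insert (PySem.List.pyGetD p 1 "") (PySem.List.pyGetD p 2 ""))
  else if PySem.List.pyGetD p 0 "" = "Leave" then
    (st.1 ++ [(PySem.List.pyGetD p 1 "", "님이 나갔습니다.")], st.2)
  else if PySem.List.pyGetD p 0 "" = "Change" then
    (st.1, st.2.insert (PySem.List.pyGetD p 1 "") (PySem.List.pyGetD p 2 ""))
  else st

-- A's second for-loop: result over the accumulated (uid, msg) pairs, with the final users dict.
-- users[uid] raises KeyError in Python when uid is absent; Pre_solution excludes that, getD "" totalizes.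
def pvAFinish (st : List (String × String) × PySem.Dict String String) : List String :=
  st.1.foldl (fun result rec => result ++ [PySem.Dict.getD st.2 rec.1 "" ++ rec.2]) []

def solution (records : List String) : List String :=
  pvAFinish (records.foldl pvAStep ([], PySem.Dict.empty))

-- ===== PORT B =====
-- B's inner helper final_name(uid): scan reversed(records); first Enter/Change for uid gives p[2].
-- Python returns None when no record matches; Option models that, getD "" totalizes the later
-- concatenation (Pre_solution excludes the inputs where that None is ever reached).
def pvBMatch (uid : String) (rec : String) : Bool :=
  let p := (PySem.Str.split? rec " ").getD []
  (PySem.List.pyGetD p 0 "" == "Enter" || PySem.List.pyGetD p 0 "" == "Change") &&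
    (PySem.List.pyGetD p 1 "" == uid)

def pvBFinalName? (records : List String) (uid : String) : Option String :=
  (records.reverse.find? (pvBMatch uid)).map
    (fun rec => PySem.List.pyGetD ((PySem.Str.split? rec " ").getD []) 2 "")

-- B's output loop: emit each Enter/Leave message directly
def pvBOutStep (records : List String) (out : List String) (rec : String) : List String :=
  let p := (PySem.Str.split? rec " ").getD []
  if PySem.List.pyGetD p 0 "" = "Enter" then
    out ++ [(pvBFinalName? records (PySem.List.pyGetD p 1 "")).getD "" ++ "님이 들어왔습니다."]
  else if PySem.List.pyGetD p 0 "" = "Leave" then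
    out ++ [(pvBFinalName? records (PySem.List.pyGetD p 1 "")).getD "" ++ "님이 나갔습니다."]
  else out

def solution_alt (records : List String) : List String :=
  records.foldl (pvBOutStep records) []

-- ===== PRECONDITION & SPEC =====
-- Pre_ excludes exactly the inputs on which Python A raises: an Enter/Change record with
-- fewer than 3 space-separated tokens or a Leave record with fewer than 2 (IndexError),
-- and a Leave whose uid never occurs in any Enter/Change record (KeyError).
def Pre_solution (records : List String) : Prop :=
  ∀ r ∈ records,
    let p := (PySem.Str.split? r " ").getD []
    ((PySem.List.pyGetD p 0 "" = "Enter" ∨ PySem.List.pyGetD p 0 "" = "Change") → 3 ≤ p.length) ∧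
    (PySem.List.pyGetD p 0 "" = "Leave" →
      2 ≤ p.length ∧ ∃ r' ∈ records,
        let q := (PySem.Str.split? r' " ").getD []
        (PySem.List.pyGetD q 0 "" = "Enter" ∨ PySem.List.pyGetD q 0 "" = "Change") ∧
        PySem.List.pyGetD q 1 "" = PySem.List.pyGetD p 1 "")
instance (records : List String) : Decidable (Pre_solution records) := by
  unfold Pre_solution; infer_instance

def pvWitness_solution : List String := ["Enter uid1 muzi", "Leave uid1"]

def Spec_solution (records : List String) (out : List String) : Prop := out = solution_alt records
instance (records : List String) (out : List String) : Decidable (Spec_solution records out) := by unfold Spec_solution; infer_instance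

-- ===== CLAIM (what is proved, stated in full; the proofs are below) =====
def Claim_equal_solution : Prop := ∀ (records : List String), Dom_solution records → Pre_solution records → Spec_solution records (solution records)

-- ===== LEMMAS AND PROOFS =====

-- the pairs A's first loop appends for one record
def pvEmitP (r : String) : List (String × String) :=
  let p := (PySem.Str.split? r " ").getD []
  if PySem.List.pyGetD p 0 "" = "Enter" then [(PySem.List.pyGetD p 1 "", "님이 들어왔습니다.")]
  else if PySem.List.pyGetD p 0 "" = "Leave" then [(PySem.List.pyGetD p 1 "", "님이 나갔습니다.")]
  else []

-- the dict effect of A's loop body, in isolation (proof helper)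
def pvDictStep (u : PySem.Dict String String) (rec : String) : PySem.Dict String String :=
  let p := (PySem.Str.split? rec " ").getD []
  if PySem.List.pyGetD p 0 "" = "Enter" ∨ PySem.List.pyGetD p 0 "" = "Change" then
    u.insert (PySem.List.pyGetD p 1 "") (PySem.List.pyGetD p 2 "")
  else u

lemma pv_users_eq (l : List String) (ans : List (String × String)) (u : PySem.Dict String String) :
    (l.foldl pvAStep (ans, u)).2 = l.foldl pvDictStep u := by
  induction l generalizing ans u with
  | nil => rfl
  | cons r t ih =>
    simp only [List.foldl_cons, pvAStep, pvDictStep]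
    split_ifs with h1 h2 h3 h4 h5 <;> first
      | exact ih _ _
      | simp_all

lemma pv_ans_eq (l : List String) (ans : List (String × String)) (u : PySem.Dict String String) :
    (l.foldl pvAStep (ans, u)).1 = ans ++ l.flatMap pvEmitP := by
  induction l generalizing ans u with
  | nil => simp
  | cons r t ih =>
    simp only [List.foldl_cons, pvAStep, List.flatMap_cons, pvEmitP]
    split_ifs with h1 h2 h3 <;> simp [ih, List.append_assoc]

-- the dict built by A agrees with B's backward search, at EVERY uid
lemma pv_dict_find (l : List String) (u : PySem.Dict String String) (uid : String) :
    PySem.Dict.getD (l.foldl pvDictStep u) uid ""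
      = match l.reverse.find? (pvBMatch uid) with
        | some r => PySem.List.pyGetD ((PySem.Str.split? r " ").getD []) 2 ""
        | none => PySem.Dict.getD u uid "" := by
  induction l generalizing u with
  | nil => simp
  | cons r t ih =>
    simp only [List.foldl_cons, List.reverse_cons, List.find?_append, ih]
    cases t.reverse.find? (pvBMatch uid) with
    | some r' => simp
    | none =>
      simp only [Option.none_or]
      by_cases hm : pvBMatch uid r
      · have := hm
        simp only [pvBMatch, Bool.and_eq_true, Bool.or_eq_true, beq_iff_eq] at this
        simp [List.find?, hm, pvDictStep, this.1, this.2, PySem.Dict.getD_insert_self]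
      · have := hm
        simp only [pvBMatch, Bool.and_eq_true, Bool.or_eq_true, beq_iff_eq, not_and_or,
          not_or] at this
        simp only [List.find?, hm]
        rcases this with h | h
        · simp [pvDictStep, h.1, h.2]
        · show (pvDictStep u r).getD uid "" = u.getD uid ""
          unfold pvDictStep
          simp only []
          split_ifs with hc
          · rw [PySem.Dict.getD_insert]
            exact if_neg (fun he => h (Eq.symm he))
          · rfl

lemma pv_out_eq (records : List String) (l : List String) (out : List String) :
    l.foldl (pvBOutStep records) out
      = out ++ l.flatMap (fun r => (pvEmitP r).map
          (fun rec => (pvBFinalName? records rec.1).getD "" ++ rec.2)) := by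
  induction l generalizing out with
  | nil => simp
  | cons r t ih =>
    simp only [List.foldl_cons, pvBOutStep, List.flatMap_cons]
    split_ifs <;> simp [pvEmitP, *, List.append_assoc]

lemma pv_name_eq (records : List String) (uid : String) :
    PySem.Dict.getD (records.foldl pvDictStep PySem.Dict.empty) uid ""
      = (pvBFinalName? records uid).getD "" := by
  rw [pv_dict_find]
  unfold pvBFinalName?
  cases records.reverse.find? (pvBMatch uid) <;> simp

-- ===== VERDICT (by name: the statement is the Claim_ definition above) =====
theorem solution_spec : Claim_equal_solution := by
  intro records _ _
  unfold Spec_solution solution solution_alt pvAFinish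
  rw [pv_users_eq, pv_ans_eq, pv_out_eq, PySem.List.foldl_append_singleton_eq_map]
  simp [List.map_flatMap, pv_name_eq]
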